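-- pv_equiv track=rewrite | github.com/brokechubb/JakeySelfBot | utils/helpers.py | detect_tool_request
-- ===== SOURCE A (Python) =====
-- from typing import List, Dict, Any
--
-- def detect_tool_request(message_content: str) -> List[str]:
--     """Detect if a message is requesting a specific tool"""
--     tools = []
--     message_lower = message_content.lower()
--
--     # Common tool request patterns
--     if 'search' in message_lower or 'find' in message_lower or 'look up' in message_lower:
--         tools.append('web_search')
--
--     if any(keyword in message_lower for keyword in ['price', 'crypto', 'btc', 'eth', 'stock', '$']):
--         if any(keyword in message_lower for keyword in ['crypto', 'btc', 'eth', 'coin']):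
--             tools.append('crypto_price')
--         else:
--             tools.append('stock_price')
--
--     if any(keyword in message_lower for keyword in ['calculate', 'math', 'compute', '+', '-', '*', '/']):
--         tools.append('calculate')
--
--     if any(keyword in message_lower for keyword in ['wen', 'when', 'bonus', 'schedule']):
--         tools.append('get_bonus_schedule')
--
--     return tools
-- ===== SOURCE B (Python) =====
-- # Bitmask formulation: one pass over a flat keyword->bit table ORs hits into a
-- # single integer mask; the tool list is then decoded from the mask's bits.
-- _KEYWORD_BITS = [
--     ('search', 1), ('find', 1), ('look up', 1),
--     ('price', 2), ('stock', 2), ('$', 2),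
--     ('crypto', 6), ('btc', 6), ('eth', 6), ('coin', 4),
--     ('calculate', 8), ('math', 8), ('compute', 8),
--     ('+', 8), ('-', 8), ('*', 8), ('/', 8),
--     ('wen', 16), ('when', 16), ('bonus', 16), ('schedule', 16),
-- ]
-- # bit 1: web_search trigger; bit 2: price trigger; bit 4: crypto discriminator;
-- # bit 8: calculate; bit 16: bonus schedule.  'crypto'/'btc'/'eth' set bits 2|4.
--
--
-- def detect_tool_request(message_content: str):
--     """Detect if a message is requesting a specific tool (bitmask decode)"""
--     msg = message_content.lower()
--     mask = 0
--     for kw, bits in _KEYWORD_BITS: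
--         if kw in msg:
--             mask |= bits
--     tools = []
--     if mask & 1:
--         tools.append('web_search')
--     if mask & 2:
--         tools.append('crypto_price' if mask & 4 else 'stock_price')
--     if mask & 8:
--         tools.append('calculate')
--     if mask & 16:
--         tools.append('get_bonus_schedule')
--     return tools
-- ===== Notes on version B (the rewrite author's own statement) =====
-- stated objective: alternative
-- what changed: Replaces the four if-blocks of any() keyword scans (with a nested crypto-vs-stock condition) by one fold over a flat keyword-to-bitmask table that ORs hits into a single integer mask, then decodes the tool list from the mask's bits; the crypto/stock split becomes a bit test instead of a second keyword scan.
import Mathlib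
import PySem

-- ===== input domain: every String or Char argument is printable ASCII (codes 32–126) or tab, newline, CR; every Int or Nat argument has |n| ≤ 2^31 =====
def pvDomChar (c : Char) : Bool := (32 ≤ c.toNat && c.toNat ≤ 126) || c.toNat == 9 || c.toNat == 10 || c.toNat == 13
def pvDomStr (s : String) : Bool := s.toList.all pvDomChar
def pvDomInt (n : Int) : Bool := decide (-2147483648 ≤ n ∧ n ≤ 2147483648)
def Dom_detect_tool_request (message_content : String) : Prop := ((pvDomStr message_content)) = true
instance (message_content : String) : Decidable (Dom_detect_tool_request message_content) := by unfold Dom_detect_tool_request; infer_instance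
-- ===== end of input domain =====

-- B: one fold over a flat keyword->bitmask table into an integer mask, decoded into the tool list by bit tests (alternative algorithm; same cost).


-- ===== PORT A =====
def detect_tool_request (message_content : String) : List String :=
  let tools : List String := []
  let message_lower := PySem.Str.lower message_content
  let tools := if PySem.Str.isIn "search" message_lower || PySem.Str.isIn "find" message_lower || PySem.Str.isIn "look up" message_lower
    then tools ++ ["web_search"] else tools
  let tools := if (["price", "crypto", "btc", "eth", "stock", "$"].any (fun keyword => PySem.Str.isIn keyword message_lower))
    then (if (["crypto", "btc", "eth", "coin"].any (fun keyword => PySem.Str.isIn keyword message_lower))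
      then tools ++ ["crypto_price"] else tools ++ ["stock_price"])
    else tools
  let tools := if (["calculate", "math", "compute", "+", "-", "*", "/"].any (fun keyword => PySem.Str.isIn keyword message_lower))
    then tools ++ ["calculate"] else tools
  let tools := if (["wen", "when", "bonus", "schedule"].any (fun keyword => PySem.Str.isIn keyword message_lower))
    then tools ++ ["get_bonus_schedule"] else tools
  tools

-- ===== PORT B =====
def pvKeywordBits : List (String × Nat) :=
  [("search", 1), ("find", 1), ("look up", 1),
   ("price", 2), ("stock", 2), ("$", 2),
   ("crypto", 6), ("btc", 6), ("eth", 6), ("coin", 4),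
   ("calculate", 8), ("math", 8), ("compute", 8),
   ("+", 8), ("-", 8), ("*", 8), ("/", 8),
   ("wen", 16), ("when", 16), ("bonus", 16), ("schedule", 16)]

def detect_tool_request_alt (message_content : String) : List String :=
  let msg := PySem.Str.lower message_content
  let mask := pvKeywordBits.foldl
    (fun acc p => if PySem.Str.isIn p.1 msg then acc ||| p.2 else acc) 0
  let tools : List String := []
  let tools := if mask &&& 1 != 0 then tools ++ ["web_search"] else tools
  let tools := if mask &&& 2 != 0
    then tools ++ [if mask &&& 4 != 0 then "crypto_price" else "stock_price"] else tools
  let tools := if mask &&& 8 != 0 then tools ++ ["calculate"] else tools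
  let tools := if mask &&& 16 != 0 then tools ++ ["get_bonus_schedule"] else tools
  tools

-- ===== PRECONDITION & SPEC =====
def Spec_detect_tool_request (message_content : String) (out : List String) : Prop := out = detect_tool_request_alt message_content
instance (message_content : String) (out : List String) : Decidable (Spec_detect_tool_request message_content out) := by unfold Spec_detect_tool_request; infer_instance

-- ===== CLAIM (what is proved, stated in full; the proofs are below) =====
def Claim_equal_detect_tool_request : Prop := ∀ (message_content : String), Dom_detect_tool_request message_content → Spec_detect_tool_request message_content (detect_tool_request message_content)

-- ===== LEMMAS AND PROOFS =====

-- the fold's mask has bit i set iff some keyword whose bit-pattern has bit i occurs in msg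
theorem foldl_mask_testBit (msg : String) (l : List (String × Nat)) (a i : Nat) :
    (l.foldl (fun acc p => if PySem.Str.isIn p.1 msg then acc ||| p.2 else acc) a).testBit i
    = (a.testBit i || l.any (fun p => PySem.Str.isIn p.1 msg && p.2.testBit i)) := by
  induction l generalizing a with
  | nil => simp
  | cons p t ih =>
    simp only [List.foldl_cons, List.any_cons, ih]
    by_cases h : PySem.Str.isIn p.1 msg = true
    · rw [if_pos h]
      simp only [h, Bool.true_and, Nat.testBit_or, Bool.or_assoc]
    · rw [if_neg h]
      simp only [Bool.not_eq_true] at h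
      simp only [h, Bool.false_and, Bool.false_or]

theorem and_pow_ne_zero (n i : Nat) : (n &&& 2 ^ i != 0) = n.testBit i := by
  rcases Nat.testBit n i |>.eq_false_or_eq_true with h | h <;>
    simp [Nat.and_two_pow, h]

-- abbreviation for B's mask at a given (already lowered) message
def pvMask (msg : String) : Nat :=
  pvKeywordBits.foldl (fun acc p => if PySem.Str.isIn p.1 msg then acc ||| p.2 else acc) 0

theorem mask_bit1 (msg : String) : (pvMask msg &&& 1 != 0)
    = (PySem.Str.isIn "search" msg || PySem.Str.isIn "find" msg || PySem.Str.isIn "look up" msg) := by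
  rw [pvMask, show (1:Nat) = 2^0 from rfl, and_pow_ne_zero, foldl_mask_testBit]
  simp [pvKeywordBits, Nat.testBit_zero, Bool.or_assoc]

theorem mask_bit2 (msg : String) : (pvMask msg &&& 2 != 0)
    = (PySem.Str.isIn "price" msg || PySem.Str.isIn "crypto" msg || PySem.Str.isIn "btc" msg ||
       PySem.Str.isIn "eth" msg || PySem.Str.isIn "stock" msg || PySem.Str.isIn "$" msg) := by
  rw [pvMask, show (2:Nat) = 2^1 from rfl, and_pow_ne_zero, foldl_mask_testBit]
  simp [pvKeywordBits, Nat.testBit_succ, Nat.testBit_zero, Bool.or_assoc, Bool.or_comm, Bool.or_left_comm]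

theorem mask_bit4 (msg : String) : (pvMask msg &&& 4 != 0)
    = (PySem.Str.isIn "crypto" msg || PySem.Str.isIn "btc" msg || PySem.Str.isIn "eth" msg ||
       PySem.Str.isIn "coin" msg) := by
  rw [pvMask, show (4:Nat) = 2^2 from rfl, and_pow_ne_zero, foldl_mask_testBit]
  simp [pvKeywordBits, Nat.testBit_succ, Nat.testBit_zero, Bool.or_assoc]

theorem mask_bit8 (msg : String) : (pvMask msg &&& 8 != 0)
    = (PySem.Str.isIn "calculate" msg || PySem.Str.isIn "math" msg || PySem.Str.isIn "compute" msg ||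
       PySem.Str.isIn "+" msg || PySem.Str.isIn "-" msg || PySem.Str.isIn "*" msg || PySem.Str.isIn "/" msg) := by
  rw [pvMask, show (8:Nat) = 2^3 from rfl, and_pow_ne_zero, foldl_mask_testBit]
  simp [pvKeywordBits, Nat.testBit_succ, Nat.testBit_zero, Bool.or_assoc]

theorem mask_bit16 (msg : String) : (pvMask msg &&& 16 != 0)
    = (PySem.Str.isIn "wen" msg || PySem.Str.isIn "when" msg || PySem.Str.isIn "bonus" msg ||
       PySem.Str.isIn "schedule" msg) := by
  rw [pvMask, show (16:Nat) = 2^4 from rfl, and_pow_ne_zero, foldl_mask_testBit]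
  simp [pvKeywordBits, Nat.testBit_succ, Nat.testBit_zero, Bool.or_assoc]

-- ===== VERDICT (by name: the statement is the Claim_ definition above) =====
theorem detect_tool_request_spec : Claim_equal_detect_tool_request := by
  intro m _
  unfold Spec_detect_tool_request
  dsimp only [detect_tool_request, detect_tool_request_alt]
  rw [show pvKeywordBits.foldl
        (fun acc p => if PySem.Str.isIn p.1 (PySem.Str.lower m) then acc ||| p.2 else acc) 0
      = pvMask (PySem.Str.lower m) from rfl,
    mask_bit1, mask_bit2, mask_bit4, mask_bit8, mask_bit16]
  simp only [List.any_cons, List.any_nil, Bool.or_false, Bool.or_assoc]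
  split_ifs <;> rfl
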